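-- pv_equiv track=rewrite | github.com/kaiiine/ai-agent | src/agents/filesystem/letter.py | _extract_header
-- ===== SOURCE A (Python) =====
-- def _extract_header(text: str) -> tuple[str, str, str]:
--     """Extrait objet, salutation, et le corps de la lettre."""
--     lines = text.strip().splitlines()
--     objet = ""
--     salut = ""
--     body_start = 0
--
--     for i, line in enumerate(lines):
--         if line.strip().lower().startswith("objet"):
--             objet = line.strip()
--             continue
--         if line.strip().lower().startswith(("madame", "monsieur", "madame,")):
--             salut = line.strip()
--             body_start = i + 1
--             break
--
--     body = "\n".join(lines[body_start:]).strip()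
--     return objet, salut, body
-- ===== SOURCE B (Python) =====
-- def _extract_header(text: str) -> tuple[str, str, str]:
--     """Extrait objet, salutation, et le corps de la lettre."""
--     lines = text.strip().splitlines()
--
--     def is_salut(line):
--         return line.strip().lower().startswith(("madame", "monsieur"))
--
--     salut_idx = next((i for i, l in enumerate(lines) if is_salut(l)), len(lines))
--     salut = lines[salut_idx].strip() if salut_idx < len(lines) else ""
--
--     objet_line = next((l for l in reversed(lines[:salut_idx])
--                        if l.strip().lower().startswith("objet")), None)
--     objet = objet_line.strip() if objet_line is not None else ""
--
--     body_start = salut_idx + 1 if salut_idx < len(lines) else 0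
--     body = "\n".join(lines[body_start:]).strip()
--     return objet, salut, body
-- ===== Notes on version B (the rewrite author's own statement) =====
-- stated objective: simpler
-- what changed: A's single enumerate loop with continue/break is replaced by two targeted passes: find the first salutation line's index, then scan the lines before it backwards for the last subject line; body start and salutation fall out of the index.
import Mathlib
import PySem

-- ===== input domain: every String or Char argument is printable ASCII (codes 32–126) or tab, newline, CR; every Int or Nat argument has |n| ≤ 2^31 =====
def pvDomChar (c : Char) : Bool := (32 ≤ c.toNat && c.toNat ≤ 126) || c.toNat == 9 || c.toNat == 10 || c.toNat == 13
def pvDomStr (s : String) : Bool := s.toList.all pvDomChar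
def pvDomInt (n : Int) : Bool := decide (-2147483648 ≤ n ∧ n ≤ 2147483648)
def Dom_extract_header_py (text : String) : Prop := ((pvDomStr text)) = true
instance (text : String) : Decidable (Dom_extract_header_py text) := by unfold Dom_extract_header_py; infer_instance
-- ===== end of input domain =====

-- B replaces A's single break-loop by two targeted passes (first salutation line, then last
-- "objet" line before it, scanned backwards); objective: simpler decomposition, same cost.

-- ===== PORT A =====
-- A's for-loop with break: structural recursion carrying (i, objet); returns (objet, salut, body_start).
def pvLoopA : List String → Int → String → String × String × Int
  | [], _, objet => (objet, "", 0)
  | l :: rest, i, objet =>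
    if PySem.Str.startswith (PySem.Str.lower (PySem.Str.strip l)) "objet" then
      pvLoopA rest (i + 1) (PySem.Str.strip l)
    else if PySem.Str.startswith (PySem.Str.lower (PySem.Str.strip l)) "madame"
         || PySem.Str.startswith (PySem.Str.lower (PySem.Str.strip l)) "monsieur"
         || PySem.Str.startswith (PySem.Str.lower (PySem.Str.strip l)) "madame," then
      (objet, PySem.Str.strip l, i + 1)
    else
      pvLoopA rest (i + 1) objet

def extract_header_py (text : String) : String × String × String :=
  let lines := PySem.Str.splitlines (PySem.Str.strip text)
  let r := pvLoopA lines 0 ""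
  (r.1, r.2.1, PySem.Str.strip (PySem.Str.join "\n" (PySem.List.slice lines (some r.2.2) none)))

-- ===== PORT B =====
def pvIsSalut (l : String) : Bool :=
  PySem.Str.startswith (PySem.Str.lower (PySem.Str.strip l)) "madame"
  || PySem.Str.startswith (PySem.Str.lower (PySem.Str.strip l)) "monsieur"

def pvIsObjet (l : String) : Bool :=
  PySem.Str.startswith (PySem.Str.lower (PySem.Str.strip l)) "objet"

def extract_header_py_alt (text : String) : String × String × String :=
  let lines := PySem.Str.splitlines (PySem.Str.strip text)
  let salutIdx := (List.findIdx? pvIsSalut lines).getD lines.length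
  let salut := match lines[salutIdx]? with
    | some l => PySem.Str.strip l
    | none => ""
  let objet := match (lines.take salutIdx).reverse.find? pvIsObjet with
    | some l => PySem.Str.strip l
    | none => ""
  let bodyStart := if salutIdx < lines.length then salutIdx + 1 else 0
  (objet, salut, PySem.Str.strip (PySem.Str.join "\n" (lines.drop bodyStart)))

-- ===== PRECONDITION & SPEC =====
def Spec_extract_header_py (text : String) (out : String × String × String) : Prop := out = extract_header_py_alt text
instance (text : String) (out : String × String × String) : Decidable (Spec_extract_header_py text out) := by unfold Spec_extract_header_py; infer_instance

-- ===== CLAIM (what is proved, stated in full; the proofs are below) =====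
def Claim_equal_extract_header_py : Prop := ∀ (text : String), Dom_extract_header_py text → Spec_extract_header_py text (extract_header_py text)

-- ===== LEMMAS AND PROOFS =====

-- "last objet line, else the accumulator": the value A's objet variable has after scanning ls.
def pvLastObj (ls : List String) (objet : String) : String :=
  match ls.reverse.find? pvIsObjet with
  | some l => PySem.Str.strip l
  | none => objet

theorem pvLoopA_cons (l : String) (ls : List String) (i : Int) (objet : String) :
    pvLoopA (l :: ls) i objet =
      if PySem.Str.startswith (PySem.Str.lower (PySem.Str.strip l)) "objet" then
        pvLoopA ls (i + 1) (PySem.Str.strip l)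
      else if PySem.Str.startswith (PySem.Str.lower (PySem.Str.strip l)) "madame"
           || PySem.Str.startswith (PySem.Str.lower (PySem.Str.strip l)) "monsieur"
           || PySem.Str.startswith (PySem.Str.lower (PySem.Str.strip l)) "madame," then
        (objet, PySem.Str.strip l, i + 1)
      else pvLoopA ls (i + 1) objet := rfl

theorem pvLastObj_cons_objet (l : String) (ls : List String) (objet : String)
    (h : pvIsObjet l = true) : pvLastObj (l :: ls) objet = pvLastObj ls (PySem.Str.strip l) := by
  simp [pvLastObj, List.find?_append, h]
  cases List.find? pvIsObjet ls.reverse <;> simp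

theorem pvLastObj_cons_not (l : String) (ls : List String) (objet : String)
    (h : pvIsObjet l = false) : pvLastObj (l :: ls) objet = pvLastObj ls objet := by
  simp [pvLastObj, List.find?_append, h]

theorem pvMadameL : "madame".toList = ['m','a','d','a','m','e'] := rfl
theorem pvMadameCL : "madame,".toList = ['m','a','d','a','m','e',','] := rfl
theorem pvMonsieurL : "monsieur".toList = ['m','o','n','s','i','e','u','r'] := rfl
theorem pvObjetL : "objet".toList = ['o','b','j','e','t'] := rfl

-- a line cannot start with both "objet" and one of the salutation prefixes
theorem pvObjet_not_salut (l : String) (h : pvIsObjet l = true) :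
    (PySem.Str.startswith (PySem.Str.lower (PySem.Str.strip l)) "madame"
     || PySem.Str.startswith (PySem.Str.lower (PySem.Str.strip l)) "monsieur"
     || PySem.Str.startswith (PySem.Str.lower (PySem.Str.strip l)) "madame,") = false := by
  unfold pvIsObjet at h
  simp only [PySem.Str.startswith_eq, PySem.Str.toList_lower, PySem.Str.toList_strip] at *
  rw [PySem.Chars.startswith_iff] at h
  obtain ⟨t, ht⟩ := h
  simp only [Bool.or_eq_false_iff]
  refine ⟨⟨?_, ?_⟩, ?_⟩ <;>
  · rw [← Bool.not_eq_true, PySem.Chars.startswith_iff]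
    rintro ⟨u, hu⟩
    rw [← ht, pvObjetL] at hu
    simp only [pvMadameL, pvMadameCL, pvMonsieurL] at hu
    simp at hu

-- A's salutation test coincides with pvIsSalut ("madame," is subsumed by "madame")
theorem pvSalutA_eq (l : String) :
    (PySem.Str.startswith (PySem.Str.lower (PySem.Str.strip l)) "madame"
     || PySem.Str.startswith (PySem.Str.lower (PySem.Str.strip l)) "monsieur"
     || PySem.Str.startswith (PySem.Str.lower (PySem.Str.strip l)) "madame,") = pvIsSalut l := by
  unfold pvIsSalut
  by_cases h : PySem.Str.startswith (PySem.Str.lower (PySem.Str.strip l)) "madame," = true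
  · have hm : PySem.Str.startswith (PySem.Str.lower (PySem.Str.strip l)) "madame" = true := by
      simp only [PySem.Str.startswith_eq, PySem.Str.toList_lower, PySem.Str.toList_strip] at *
      rw [PySem.Chars.startswith_iff] at h ⊢
      obtain ⟨t, ht⟩ := h
      refine ⟨',' :: t, ?_⟩
      rw [← ht, pvMadameL, pvMadameCL]
      simp
    rw [h, hm]
    simp
  · rw [Bool.not_eq_true] at h
    rw [h]
    simp

-- characterisation of A's loop in terms of B's two passes
theorem pvLoopA_eq (ls : List String) (i : Int) (objet : String) :
    pvLoopA ls i objet =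
      match List.findIdx? pvIsSalut ls with
      | some k => (pvLastObj (ls.take k) objet,
                   (match ls[k]? with | some l => PySem.Str.strip l | none => ""),
                   i + (k : Int) + 1)
      | none => (pvLastObj ls objet, "", 0) := by
  induction ls generalizing i objet with
  | nil => simp [pvLoopA, pvLastObj]
  | cons l rest ih =>
    rw [pvLoopA_cons, List.findIdx?_cons]
    by_cases ho : pvIsObjet l = true
    · have hs := pvObjet_not_salut l ho
      have hns : pvIsSalut l = false := by rw [pvSalutA_eq] at hs; exact hs
      have ho'' : PySem.Str.startswith (PySem.Str.lower (PySem.Str.strip l)) "objet" = true := ho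
      rw [if_pos ho'', hns, ih]
      cases hf : List.findIdx? pvIsSalut rest with
      | none => simp [pvLastObj_cons_objet l rest objet ho]
      | some k =>
        simp only [Option.map_some, Bool.false_eq_true, if_false]
        rw [List.take_succ_cons, pvLastObj_cons_objet l (rest.take k) objet ho]
        refine Prod.ext rfl (Prod.ext rfl ?_)
        push_cast
        ring
    · have ho' : pvIsObjet l = false := by simpa using ho
      have ho'' : ¬ PySem.Str.startswith (PySem.Str.lower (PySem.Str.strip l)) "objet" = true := ho
      rw [if_neg ho'']
      by_cases hsal : pvIsSalut l = true
      · have hA := (pvSalutA_eq l).trans hsal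
        rw [if_pos hA, hsal]
        simp [pvLastObj]
      · have hsal' : pvIsSalut l = false := by simpa using hsal
        have hA : ¬ (PySem.Str.startswith (PySem.Str.lower (PySem.Str.strip l)) "madame"
            || PySem.Str.startswith (PySem.Str.lower (PySem.Str.strip l)) "monsieur"
            || PySem.Str.startswith (PySem.Str.lower (PySem.Str.strip l)) "madame,") = true := by
          rw [pvSalutA_eq]; exact hsal
        rw [if_neg hA, hsal', ih]
        cases hf : List.findIdx? pvIsSalut rest with
        | none => simp [pvLastObj_cons_not l rest objet ho']
        | some k =>
          simp only [Option.map_some, Bool.false_eq_true, if_false]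
          rw [List.take_succ_cons, pvLastObj_cons_not l (rest.take k) objet ho']
          refine Prod.ext rfl (Prod.ext rfl ?_)
          push_cast
          ring

-- ===== VERDICT (by name: the statement is the Claim_ definition above) =====
theorem extract_header_py_spec : Claim_equal_extract_header_py := by
  intro text _
  unfold Spec_extract_header_py
  simp only [extract_header_py, extract_header_py_alt]
  set lines := PySem.Str.splitlines (PySem.Str.strip text) with hl
  clear_value lines
  rw [pvLoopA_eq]
  cases hf : List.findIdx? pvIsSalut lines with
  | none =>
    dsimp only
    simp only [Option.getD_none]
    have hnone : lines[lines.length]? = none := by simp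
    have hlt : ¬ lines.length < lines.length := by omega
    simp only [hnone, hlt, if_false, List.take_length, List.drop_zero]
    rw [show PySem.List.slice lines (some (0 : Int)) none = lines.drop (0:Int).toNat from
          PySem.List.slice_from lines (a := 0) (by omega)]
    simp [pvLastObj]
  | some k =>
    dsimp only
    have hk : k < lines.length := by
      rcases List.findIdx?_eq_some_iff_getElem.mp hf with ⟨h, _⟩
      exact h
    simp only [Option.getD_some, hk, if_true]
    rw [show PySem.List.slice lines (some ((0:Int) + (k : Int) + 1)) none
          = lines.drop ((0:Int) + (k:Int) + 1).toNat from
          PySem.List.slice_from lines (by positivity)]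
    norm_num
    rfl
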